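-- pv_equiv track=rewrite | github.com/Yorchly/ytDownloader | ytDownloader/ytDownloader.py | transformPath
-- ===== SOURCE A (Python) =====
-- def transformPath(path):
-- 	pathSplit = path.split(" ")
-- 	sol = ""
-- 	for i in range(len(pathSplit)):
-- 		if i < (len(pathSplit) - 1):
-- 			sol += pathSplit[i] + "\\ "
-- 		else:
-- 			sol += pathSplit[i]
-- 	return sol
-- ===== SOURCE B (Python) =====
-- def transformPath(path):
-- 	out = []
-- 	for ch in path:
-- 		if ch == ' ':
-- 			out.append('\\')
-- 			out.append(' ')
-- 		else:
-- 			out.append(ch)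
-- 	return ''.join(out)
-- ===== Notes on version B (the rewrite author's own statement) =====
-- stated objective: simpler
-- what changed: B replaces A's split-on-space, index-counting loop and rejoin strategy by a single character-level scan that emits a backslash followed by the space for each space character and every other character unchanged, joined once at the end.
import Mathlib
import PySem

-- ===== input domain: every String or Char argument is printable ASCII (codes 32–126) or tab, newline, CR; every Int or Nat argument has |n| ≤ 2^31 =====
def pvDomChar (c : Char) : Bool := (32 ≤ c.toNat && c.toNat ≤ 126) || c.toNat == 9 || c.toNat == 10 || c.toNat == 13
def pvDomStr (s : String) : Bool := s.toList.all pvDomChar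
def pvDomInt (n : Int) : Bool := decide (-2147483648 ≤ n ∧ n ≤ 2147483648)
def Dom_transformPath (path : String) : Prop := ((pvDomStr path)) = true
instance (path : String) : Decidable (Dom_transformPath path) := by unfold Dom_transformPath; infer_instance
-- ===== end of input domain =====

-- B escapes spaces by a single character scan (emit backslash then the space per space char) instead of A's
-- split-on-space / index-loop / rejoin; objective: simpler, same cost.

-- ===== PORT A =====
def transformPath (path : String) : String :=
  let pathSplit : List String := (PySem.Chars.splitOn path.toList " ".toList).map String.ofList
  (PySem.List.pyRange 0 (pathSplit.length : Int) 1).foldl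
    (fun sol i =>
      if i < (pathSplit.length : Int) - 1 then
        sol ++ PySem.List.pyGetD pathSplit i "" ++ "\\ "
      else
        sol ++ PySem.List.pyGetD pathSplit i "")
    ""

-- ===== PORT B =====
def transformPath_alt (path : String) : String :=
  let out : List String :=
    path.toList.foldl
      (fun out c => if c = ' ' then out ++ ["\\", " "] else out ++ [String.ofList [c]])
      []
  PySem.Str.join "" out

-- ===== PRECONDITION & SPEC =====
def Spec_transformPath (path : String) (out : String) : Prop := out = transformPath_alt path
instance (path : String) (out : String) : Decidable (Spec_transformPath path out) := by unfold Spec_transformPath; infer_instance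

-- ===== CLAIM (what is proved, stated in full; the proofs are below) =====
def Claim_equal_transformPath : Prop := ∀ (path : String), Dom_transformPath path → Spec_transformPath path (transformPath path)

-- ===== LEMMAS AND PROOFS =====

/-- per-character escaping: the common specification both ports are reduced to -/
def escChar (c : Char) : List Char := if c = ' ' then ['\\', ' '] else [c]

/-- structural version of splitting on a single space -/
def mySplit : List Char → List (List Char)
  | [] => [[]]
  | c :: cs =>
    if c = ' ' then [] :: mySplit cs
    else
      match mySplit cs with
      | [] => [[c]]
      | h :: t => (c :: h) :: t

lemma mySplit_ne_nil (cs : List Char) : mySplit cs ≠ [] := by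
  cases cs with
  | nil => simp [mySplit]
  | cons c cs =>
    simp only [mySplit]
    split
    · simp
    · cases h : mySplit cs <;> simp

/-- prepend to the head part (used to characterise splitOn.go's accumulator) -/
def consHead (p : List Char) : List (List Char) → List (List Char)
  | [] => [p]
  | h :: t => (p ++ h) :: t

lemma go_spec : ∀ (fuel : Nat) (l cur : List Char) (acc : List (List Char)),
    l.length < fuel →
    PySem.Chars.splitOn.go [' '] fuel l cur acc = acc.reverse ++ consHead cur.reverse (mySplit l) := by
  intro fuel
  induction fuel with
  | zero => intro l cur acc h; omega
  | succ f ih =>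
    intro l cur acc h
    cases l with
    | nil => simp [PySem.Chars.splitOn.go, mySplit, consHead]
    | cons c rest =>
      by_cases hc : c = ' '
      · subst hc
        have hp : [' '].isPrefixOf (' ' :: rest) = true := by simp [List.isPrefixOf]
        simp only [PySem.Chars.splitOn.go, hp, if_pos, List.length_cons, List.drop_succ_cons]

        simp only [List.length_nil, List.drop_zero]
        rw [ih rest [] (cur.reverse :: acc) (by simpa using Nat.lt_of_succ_lt_succ h)]
        simp only [mySplit]
        obtain ⟨h', t', ht⟩ : ∃ h' t', mySplit rest = h' :: t' := by
          cases hm : mySplit rest with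
          | nil => exact absurd hm (mySplit_ne_nil rest)
          | cons a b => exact ⟨a, b, rfl⟩
        simp [ht, consHead]
      · have hp : [' '].isPrefixOf (c :: rest) = false := by
          simp [List.isPrefixOf]; exact fun h' => hc h'.symm
        simp only [PySem.Chars.splitOn.go, hp, Bool.false_eq_true, if_false]
        rw [ih rest (c :: cur) acc (by simpa using Nat.lt_of_succ_lt_succ h)]
        simp only [mySplit, if_neg hc]
        cases hm : mySplit rest with
        | nil => exact absurd hm (mySplit_ne_nil rest)
        | cons h' t' => simp [consHead]

lemma splitOn_space (cs : List Char) : PySem.Chars.splitOn cs [' '] = mySplit cs := by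
  unfold PySem.Chars.splitOn
  rw [go_spec (cs.length + 1) cs [] [] (Nat.lt_succ_self _)]
  obtain ⟨h', t', ht⟩ : ∃ h' t', mySplit cs = h' :: t' := by
    cases hm : mySplit cs with
    | nil => exact absurd hm (mySplit_ne_nil cs)
    | cons a b => exact ⟨a, b, rfl⟩
  simp [ht, consHead]

lemma join_cons_head (sep : List Char) (c : Char) (h : List Char) (t : List (List Char)) :
    PySem.Chars.join sep ((c :: h) :: t) = c :: PySem.Chars.join sep (h :: t) := by
  cases t with
  | nil => simp [PySem.Chars.join_singleton]
  | cons q r => simp [PySem.Chars.join_cons_cons]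

lemma join_mySplit (cs : List Char) :
    PySem.Chars.join ['\\', ' '] (mySplit cs) = cs.flatMap escChar := by
  induction cs with
  | nil => simp [mySplit, PySem.Chars.join_singleton]
  | cons c cs ih =>
    by_cases hc : c = ' '
    · subst hc
      obtain ⟨h', t', ht⟩ : ∃ h' t', mySplit cs = h' :: t' := by
        cases hm : mySplit cs with
        | nil => exact absurd hm (mySplit_ne_nil cs)
        | cons a b => exact ⟨a, b, rfl⟩
      have hm : mySplit (' ' :: cs) = [] :: h' :: t' := by simp [mySplit, ht]
      rw [hm, PySem.Chars.join_cons_cons, ← ht, ih]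
      simp [escChar]
    · simp only [mySplit, if_neg hc]
      obtain ⟨h', t', ht⟩ : ∃ h' t', mySplit cs = h' :: t' := by
        cases hm : mySplit cs with
        | nil => exact absurd hm (mySplit_ne_nil cs)
        | cons a b => exact ⟨a, b, rfl⟩
      rw [ht, join_cons_head, ← ht, ih]
      simp [escChar, hc]

-- String-level facts about PySem.Str.join with separator "\\ "
lemma strJoin_nil (sep : String) : PySem.Str.join sep [] = "" := by
  apply String.toList_inj.mp
  simp [PySem.Str.toList_join, PySem.Chars.join_nil]

lemma strJoin_singleton (sep x : String) : PySem.Str.join sep [x] = x := by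
  apply String.toList_inj.mp
  simp [PySem.Str.toList_join, PySem.Chars.join_singleton]

lemma strJoin_cons_cons (sep x y : String) (rest : List String) :
    PySem.Str.join sep (x :: y :: rest) = x ++ sep ++ PySem.Str.join sep (y :: rest) := by
  apply String.toList_inj.mp
  simp [PySem.Str.toList_join, PySem.Chars.join_cons_cons]

/-- A's index loop computes the "\\ "-join of the remaining parts -/
lemma loopA (parts : List String) :
    ∀ (k a : Nat) (sol : String), parts.length - a = k →
    (PySem.List.pyRange (a : Int) (parts.length : Int) 1).foldl
      (fun sol i =>
        if i < (parts.length : Int) - 1 then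
          sol ++ PySem.List.pyGetD parts i "" ++ "\\ "
        else
          sol ++ PySem.List.pyGetD parts i "") sol
      = sol ++ PySem.Str.join "\\ " (parts.drop a) := by
  intro k
  induction k with
  | zero =>
    intro a sol hk
    have ha : parts.length ≤ a := by omega
    have : PySem.List.pyRange (a : Int) (parts.length : Int) 1 = [] := by
      simp [PySem.List.pyRange]; omega
    rw [this, List.drop_eq_nil_of_le ha]
    simp [strJoin_nil]
  | succ k ih =>
    intro a sol hk
    have ha : a < parts.length := by omega
    rw [PySem.List.pyRange_one_cons (by exact_mod_cast ha)]
    simp only [List.foldl_cons]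
    have hget : PySem.List.pyGetD parts (a : Int) "" = parts[a] := by
      rw [PySem.List.pyGetD_natCast, List.getD_eq_getElem _ _ ha]
    have hdrop : parts.drop a = parts[a] :: parts.drop (a + 1) :=
      List.drop_eq_getElem_cons ha
    have hcast : ((a : Int) + 1) = ((a + 1 : Nat) : Int) := by push_cast; ring
    by_cases hlt : a < parts.length - 1
    · have hcond : (a : Int) < (parts.length : Int) - 1 := by omega
      rw [if_pos hcond, hget, hcast, ih (a + 1) _ (by omega)]
      have h2 : a + 1 < parts.length := by omega
      have hdrop2 : parts.drop (a + 1) = parts[a+1] :: parts.drop (a + 2) :=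
        List.drop_eq_getElem_cons h2
      rw [hdrop, hdrop2, strJoin_cons_cons, ← hdrop2]
      simp [String.append_assoc]
    · have hcond : ¬ ((a : Int) < (parts.length : Int) - 1) := by omega
      rw [if_neg hcond, hget, hcast, ih (a + 1) _ (by omega)]
      have hd1 : parts.drop (a + 1) = [] := List.drop_eq_nil_of_le (by omega)
      rw [hd1] at hdrop ⊢
      rw [strJoin_nil, hdrop, strJoin_singleton]
      apply String.toList_inj.mp; simp

lemma transformPath_toList (path : String) :
    (transformPath path).toList = path.toList.flatMap escChar := by
  unfold transformPath
  rw [show ((0 : Int) = ((0 : Nat) : Int)) from rfl,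
    loopA ((PySem.Chars.splitOn path.toList " ".toList).map String.ofList)
      ((PySem.Chars.splitOn path.toList " ".toList).map String.ofList).length 0 "" rfl]
  have : ("" : String) ++ PySem.Str.join "\\ "
      (((PySem.Chars.splitOn path.toList " ".toList).map String.ofList).drop 0)
      = PySem.Str.join "\\ " ((PySem.Chars.splitOn path.toList " ".toList).map String.ofList) := by
    apply String.toList_inj.mp; simp
  rw [this, PySem.Str.toList_join]
  have hsep : (" " : String).toList = [' '] := rfl
  have hsep2 : ("\\ " : String).toList = ['\\', ' '] := rfl
  rw [hsep, hsep2, splitOn_space]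
  rw [List.map_map]
  have : (String.toList ∘ String.ofList) = id := by funext l; simp
  rw [this, List.map_id, join_mySplit]

lemma transformPath_alt_toList (path : String) :
    (transformPath_alt path).toList = path.toList.flatMap escChar := by
  unfold transformPath_alt
  have hbody : (fun (out : List String) (c : Char) =>
      if c = ' ' then out ++ ["\\", " "] else out ++ [String.ofList [c]])
      = fun out c => out ++ (escChar c).map (fun d => String.ofList [d]) := by
    funext out c
    by_cases hc : c = ' ' <;> simp [hc, escChar]
  rw [hbody, PySem.List.foldl_append_eq_flatMap]
  rw [← List.map_flatMap]
  rw [PySem.Str.toList_join]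
  simp only [List.nil_append, List.map_map]
  have : (String.toList ∘ fun d => String.ofList [d]) = fun c => [c] := by
    funext c; simp
  rw [this]
  have hsep : ("" : String).toList = [] := rfl
  rw [hsep, PySem.Chars.join_nil_singletons]

-- ===== VERDICT (by name: the statement is the Claim_ definition above) =====
theorem transformPath_spec : Claim_equal_transformPath := by
  intro path _
  unfold Spec_transformPath
  apply String.toList_inj.mp
  rw [transformPath_toList, transformPath_alt_toList]
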